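-- pv_equiv track=rewrite | github.com/FlashDemo8789/newapp | app/ml/data_loader.py | is_valid_record
-- ===== SOURCE A (Python) =====
-- from typing import Dict, List, Any, Optional, Tuple
--
-- def is_valid_record(record: Dict[str, Any]) -> bool:
--     """Check if a record has enough valid data to be useful for training"""
--     # Need at least some data in each dimension
--     capital_fields = [k for k in record.keys() if k.startswith("capital_")]
--     advantage_fields = [k for k in record.keys() if k.startswith("advantage_")]
--     market_fields = [k for k in record.keys() if k.startswith("market_")]
--     people_fields = [k for k in record.keys() if k.startswith("people_")]
--
--     # Check if we have at least some non-zero values in each dimension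
--     has_capital = any(record.get(k, 0) > 0 for k in capital_fields)
--     has_advantage = any(record.get(k, 0) > 0 for k in advantage_fields)
--     has_market = any(record.get(k, 0) > 0 for k in market_fields)
--     has_people = any(record.get(k, 0) > 0 for k in people_fields)
--
--     # Require at least 2 dimensions to have data
--     dimensions_with_data = sum([has_capital, has_advantage, has_market, has_people])
--     return dimensions_with_data >= 2
-- ===== SOURCE B (Python) =====
-- _PREFIXES = ("capital_", "advantage_", "market_", "people_")
--
--
-- def _dim_of(key):
--     """Return the dimension prefix of a key, or None."""
--     for p in _PREFIXES:
--         if key.startswith(p):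
--             return p
--     return None
--
--
-- def is_valid_record(record):
--     """Check if a record has enough valid data to be useful for training."""
--     found = set()
--     for k, v in record.items():
--         d = _dim_of(k)
--         if d is not None and d not in found and v > 0:
--             found.add(d)
--     return len(found) >= 2
-- ===== Notes on version B (the rewrite author's own statement) =====
-- stated objective: alternative
-- what changed: Replaces the four filter-the-keys passes plus four short-circuiting any-scans with a single pass over the items that classifies each key by its dimension prefix and collects the dimensions seen with a positive value in a set, returning len(found) >= 2.
import Mathlib
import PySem

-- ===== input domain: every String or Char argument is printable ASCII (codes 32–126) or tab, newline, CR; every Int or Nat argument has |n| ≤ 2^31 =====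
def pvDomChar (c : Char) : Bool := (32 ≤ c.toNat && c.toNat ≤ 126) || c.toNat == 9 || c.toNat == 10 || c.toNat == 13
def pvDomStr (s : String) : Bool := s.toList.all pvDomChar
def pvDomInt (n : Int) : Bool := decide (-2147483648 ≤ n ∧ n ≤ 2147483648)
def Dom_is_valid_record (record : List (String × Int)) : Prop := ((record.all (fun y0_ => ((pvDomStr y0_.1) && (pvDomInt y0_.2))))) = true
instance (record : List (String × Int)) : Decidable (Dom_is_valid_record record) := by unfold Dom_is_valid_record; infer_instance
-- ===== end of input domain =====

-- B makes one pass over the items, classifying keys by dimension prefix into a set, instead of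
-- A's four key-filter passes plus four any-scans; equivalence of the RETURN value is proved.

-- ===== PORT A =====
def is_valid_record (record : List (String × Int)) : Bool :=
  let d := PySem.Dict.ofList record
  let capital_fields := d.keys.filter (fun k => PySem.Str.startswith k "capital_")
  let advantage_fields := d.keys.filter (fun k => PySem.Str.startswith k "advantage_")
  let market_fields := d.keys.filter (fun k => PySem.Str.startswith k "market_")
  let people_fields := d.keys.filter (fun k => PySem.Str.startswith k "people_")
  let has_capital := capital_fields.any (fun k => decide (d.getD k 0 > 0))
  let has_advantage := advantage_fields.any (fun k => decide (d.getD k 0 > 0))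
  let has_market := market_fields.any (fun k => decide (d.getD k 0 > 0))
  let has_people := people_fields.any (fun k => decide (d.getD k 0 > 0))
  let dimensions_with_data : Int :=
    [has_capital, has_advantage, has_market, has_people].foldl
      (fun acc b => acc + if b then 1 else 0) 0
  decide (dimensions_with_data ≥ 2)

-- ===== PORT B =====
-- _dim_of: first matching dimension prefix, or none
def pvDimOf (key : String) : Option String :=
  ["capital_", "advantage_", "market_", "people_"].find?
    (fun p => PySem.Str.startswith key p)

-- the body of B's single for-loop over record.items()
def pvScan (items : List (String × Int)) (found : PySem.Set String) : PySem.Set String :=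
  items.foldl
    (fun s kv =>
      match pvDimOf kv.1 with
      | some dim => if s.contains dim then s else if kv.2 > (0:Int) then s.add dim else s
      | none => s)
    found

def is_valid_record_alt (record : List (String × Int)) : Bool :=
  let d := PySem.Dict.ofList record
  let found := pvScan d.items PySem.Set.empty
  decide (found.length ≥ 2)

-- ===== PRECONDITION & SPEC =====
def Spec_is_valid_record (record : List (String × Int)) (out : Bool) : Prop := out = is_valid_record_alt record
instance (record : List (String × Int)) (out : Bool) : Decidable (Spec_is_valid_record record out) := by unfold Spec_is_valid_record; infer_instance

-- ===== CLAIM (what is proved, stated in full; the proofs are below) =====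
def Claim_equal_is_valid_record : Prop := ∀ (record : List (String × Int)), Dom_is_valid_record record → Spec_is_valid_record record (is_valid_record record)

-- ===== LEMMAS AND PROOFS =====

def pvDims : List String := ["capital_", "advantage_", "market_", "people_"]

theorem pv_head_of_startswith (k p : String) (c : Char) (hc : p.toList.head? = some c)
    (h : PySem.Str.startswith k p = true) : k.toList.head? = some c := by
  rw [PySem.Str.startswith_eq] at h
  obtain ⟨t, ht⟩ := (PySem.Chars.startswith_iff _ _).1 h
  rw [← ht]
  cases hpl : p.toList with
  | nil => rw [hpl] at hc; simp at hc
  | cons a r => rw [hpl] at hc; simp at hc ⊢; exact hc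

theorem pvDimOf_eq_some_of (k p : String) (hp : p ∈ pvDims)
    (h : PySem.Str.startswith k p = true) : pvDimOf k = some p := by
  have hhd : ∀ (q : String) (c : Char), q.toList.head? = some c →
      PySem.Str.startswith k q = true → k.toList.head? = some c :=
    fun q c hc hq => pv_head_of_startswith k q c hc hq
  fin_cases hp
  · simp only [pvDimOf, List.find?, h]
  · have h1 := hhd _ 'a' (by decide) h
    have hc : PySem.Str.startswith k "capital_" = false := by
      cases hsw : PySem.Str.startswith k "capital_" with
      | false => rfl
      | true => have := hhd _ 'c' (by decide) hsw; rw [this] at h1; simp at h1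
    simp only [pvDimOf, List.find?, h, hc]
  · have h1 := hhd _ 'm' (by decide) h
    have hc : PySem.Str.startswith k "capital_" = false := by
      cases hsw : PySem.Str.startswith k "capital_" with
      | false => rfl
      | true => have := hhd _ 'c' (by decide) hsw; rw [this] at h1; simp at h1
    have ha : PySem.Str.startswith k "advantage_" = false := by
      cases hsw : PySem.Str.startswith k "advantage_" with
      | false => rfl
      | true => have := hhd _ 'a' (by decide) hsw; rw [this] at h1; simp at h1
    simp only [pvDimOf, List.find?, h, hc, ha]
  · have h1 := hhd _ 'p' (by decide) h
    have hc : PySem.Str.startswith k "capital_" = false := by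
      cases hsw : PySem.Str.startswith k "capital_" with
      | false => rfl
      | true => have := hhd _ 'c' (by decide) hsw; rw [this] at h1; simp at h1
    have ha : PySem.Str.startswith k "advantage_" = false := by
      cases hsw : PySem.Str.startswith k "advantage_" with
      | false => rfl
      | true => have := hhd _ 'a' (by decide) hsw; rw [this] at h1; simp at h1
    have hm : PySem.Str.startswith k "market_" = false := by
      cases hsw : PySem.Str.startswith k "market_" with
      | false => rfl
      | true => have := hhd _ 'm' (by decide) hsw; rw [this] at h1; simp at h1
    simp only [pvDimOf, List.find?, h, hc, ha, hm]

theorem pvScan_mem (l : List (String × Int)) :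
    ∀ (s : PySem.Set String) (x : String),
      x ∈ pvScan l s ↔ x ∈ s ∨ ∃ kv ∈ l, pvDimOf kv.1 = some x ∧ kv.2 > 0 := by
  induction l with
  | nil => intro s x; simp [pvScan]
  | cons kv t ih =>
    intro s x
    show x ∈ pvScan t _ ↔ _
    rw [ih]
    cases hdim : pvDimOf kv.1 with
    | none =>
      simp only [hdim]
      constructor
      · rintro (hs | ⟨w, hw1, hw2, hw3⟩)
        · exact Or.inl hs
        · exact Or.inr ⟨w, List.mem_cons_of_mem _ hw1, hw2, hw3⟩
      · rintro (hs | ⟨w, hw1, hw2, hw3⟩)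
        · exact Or.inl hs
        · rcases List.mem_cons.1 hw1 with rfl | hmem
          · rw [hdim] at hw2; simp at hw2
          · exact Or.inr ⟨w, hmem, hw2, hw3⟩
    | some dim =>
      simp only [hdim]
      by_cases hcont : s.contains dim
      · simp only [hcont, if_true]
        constructor
        · rintro (hs | ⟨w, hw1, hw2, hw3⟩)
          · exact Or.inl hs
          · exact Or.inr ⟨w, List.mem_cons_of_mem _ hw1, hw2, hw3⟩
        · rintro (hs | ⟨w, hw1, hw2, hw3⟩)
          · exact Or.inl hs
          · rcases List.mem_cons.1 hw1 with rfl | hmem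
            · rw [hdim] at hw2; injection hw2 with hx
              exact Or.inl (hx ▸ List.contains_iff_mem.1 hcont)
            · exact Or.inr ⟨w, hmem, hw2, hw3⟩
      · simp only [Bool.not_eq_true] at hcont
        rw [hcont, if_neg (by simp)]
        by_cases hv : kv.2 > (0:Int)
        · rw [if_pos hv]
          rw [PySem.Set.mem_add]
          constructor
          · rintro ((hs | rfl) | ⟨w, hw1, hw2, hw3⟩)
            · exact Or.inl hs
            · exact Or.inr ⟨kv, List.mem_cons_self .., hdim, hv⟩
            · exact Or.inr ⟨w, List.mem_cons_of_mem _ hw1, hw2, hw3⟩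
          · rintro (hs | ⟨w, hw1, hw2, hw3⟩)
            · exact Or.inl (Or.inl hs)
            · rcases List.mem_cons.1 hw1 with rfl | hmem
              · rw [hdim] at hw2; injection hw2 with hx; exact Or.inl (Or.inr hx.symm)
              · exact Or.inr ⟨w, hmem, hw2, hw3⟩
        · rw [if_neg hv]
          constructor
          · rintro (hs | ⟨w, hw1, hw2, hw3⟩)
            · exact Or.inl hs
            · exact Or.inr ⟨w, List.mem_cons_of_mem _ hw1, hw2, hw3⟩
          · rintro (hs | ⟨w, hw1, hw2, hw3⟩)
            · exact Or.inl hs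
            · rcases List.mem_cons.1 hw1 with rfl | hmem
              · rw [hdim] at hw2; injection hw2 with hx; exact absurd hw3 hv
              · exact Or.inr ⟨w, hmem, hw2, hw3⟩

theorem pvScan_nodup (l : List (String × Int)) :
    ∀ (s : PySem.Set String), s.Nodup → (pvScan l s).Nodup := by
  induction l with
  | nil => intro s hs; exact hs
  | cons kv t ih =>
    intro s hs
    show (pvScan t _).Nodup
    apply ih
    cases hdim : pvDimOf kv.1 with
    | none => simp only [hdim]; exact hs
    | some dim =>
      simp only [hdim]
      split_ifs
      · exact hs
      · exact PySem.Set.nodup_add s dim hs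
      · exact hs

theorem pvHas_iff (d : PySem.Dict String Int) (h : d.keys.Nodup) (p : String) :
    ((d.keys.filter (fun k => PySem.Str.startswith k p)).any
        (fun k => decide (d.getD k 0 > 0))) = true
      ↔ ∃ kv ∈ d.items, PySem.Str.startswith kv.1 p = true ∧ kv.2 > 0 := by
  simp only [List.any_eq_true, List.mem_filter, decide_eq_true_eq]
  constructor
  · rintro ⟨k, ⟨hk, hsw⟩, hgt⟩
    obtain ⟨kv, hkv, rfl⟩ := List.mem_map.1 hk
    refine ⟨kv, hkv, hsw, ?_⟩
    have hgd := PySem.Dict.getD_of_mem_items d (k := kv.1) (v := kv.2) (by simpa using hkv) h 0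
    rwa [hgd] at hgt
  · rintro ⟨⟨k, v⟩, hkv, hsw, hv⟩
    refine ⟨k, ⟨List.mem_map_of_mem hkv, hsw⟩, ?_⟩
    rwa [PySem.Dict.getD_of_mem_items d hkv h 0]

theorem pvDims_of_mem_scan {d : PySem.Dict String Int} {x : String}
    (hx : x ∈ pvScan d.items PySem.Set.empty) : x ∈ pvDims := by
  rcases (pvScan_mem _ _ _).1 hx with hs | ⟨w, _, hw, _⟩
  · simp [PySem.Set.empty] at hs
  · exact List.mem_of_find?_eq_some hw

theorem pv_hasp_eq_contains (d : PySem.Dict String Int) (h : d.keys.Nodup)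
    (p : String) (hp : p ∈ pvDims) :
    ((d.keys.filter (fun k => PySem.Str.startswith k p)).any
        (fun k => decide (d.getD k 0 > 0)))
      = (pvScan d.items PySem.Set.empty).contains p := by
  rw [Bool.eq_iff_iff, pvHas_iff d h p]
  simp only [PySem.Set.contains_iff, pvScan_mem]
  constructor
  · rintro ⟨kv, h1, h2, h3⟩
    exact Or.inr ⟨kv, h1, pvDimOf_eq_some_of _ _ hp h2, h3⟩
  · rintro (hs | ⟨kv, h1, h2, h3⟩)
    · simp [PySem.Set.empty] at hs
    · exact ⟨kv, h1, List.find?_some h2, h3⟩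

theorem pv_len_eq (F : List String) (hnd : F.Nodup) (hsub : ∀ x ∈ F, x ∈ pvDims) :
    F.length = (pvDims.filter (fun p => F.contains p)).length := by
  apply List.Perm.length_eq
  rw [List.perm_ext_iff_of_nodup hnd (List.Nodup.filter _ (by decide))]
  intro a
  simp only [List.mem_filter]
  exact ⟨fun ha => ⟨hsub a ha, (PySem.Set.contains_iff F a).2 ha⟩,
    fun ha => (PySem.Set.contains_iff F a).1 ha.2⟩

theorem pv_main : ∀ (record : List (String × Int)),
    is_valid_record record = is_valid_record_alt record := by
  intro record
  simp only [is_valid_record, is_valid_record_alt]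
  have hnd : (PySem.Dict.ofList record).keys.Nodup := PySem.Dict.nodup_keys_ofList record
  have hFnd : (pvScan (PySem.Dict.ofList record).items PySem.Set.empty).Nodup :=
    pvScan_nodup _ _ List.nodup_nil
  have hsub := fun x hx => pvDims_of_mem_scan (d := PySem.Dict.ofList record) (x := x) hx
  rw [pv_hasp_eq_contains _ hnd "capital_" (by decide),
      pv_hasp_eq_contains _ hnd "advantage_" (by decide),
      pv_hasp_eq_contains _ hnd "market_" (by decide),
      pv_hasp_eq_contains _ hnd "people_" (by decide),
      pv_len_eq _ hFnd hsub]
  cases hb1 : (pvScan (PySem.Dict.ofList record).items PySem.Set.empty).contains "capital_" <;>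
  cases hb2 : (pvScan (PySem.Dict.ofList record).items PySem.Set.empty).contains "advantage_" <;>
  cases hb3 : (pvScan (PySem.Dict.ofList record).items PySem.Set.empty).contains "market_" <;>
  cases hb4 : (pvScan (PySem.Dict.ofList record).items PySem.Set.empty).contains "people_" <;>
  simp at hb1 hb2 hb3 hb4 <;>
  simp [pvDims, List.filter, hb1, hb2, hb3, hb4]

-- ===== VERDICT (by name: the statement is the Claim_ definition above) =====
theorem is_valid_record_spec : Claim_equal_is_valid_record := by
  intro record _
  unfold Spec_is_valid_record
  exact pv_main record
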